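-- pv_equiv track=rewrite | github.com/ana-maria-kcl/our_project | apiret.py | mod
-- ===== SOURCE A (Python) =====
-- def mod(api_key):
--     arr = ['0','2','2', '9', '3']
--     newkey = ''
--     counter = 0
--     for i in range(0, len(api_key)):
--         if i % 2 == 0:
--            if counter < len(arr):
--                newkey += arr[counter]
--                counter+=1
--            else:
--               newkey += api_key[i]
--         else:
--             newkey += api_key[i]
--
--     return newkey
-- ===== SOURCE B (Python) =====
-- def mod(api_key):
--     arr = ['0', '2', '2', '9', '3']
--     chars = list(api_key)
--     for j in range(5):
--         idx = 2 * j
--         if idx < len(chars):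
--             chars[idx] = arr[j]
--     return ''.join(chars)
-- ===== Notes on version B (the rewrite author's own statement) =====
-- stated objective: faster
-- what changed: Instead of scanning every character with a threaded counter and rebuilding the string by repeated concatenation, B loops only over the five replacement values, writes each at its closed-form position 2*j into a char list, and joins once.
import Mathlib
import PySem

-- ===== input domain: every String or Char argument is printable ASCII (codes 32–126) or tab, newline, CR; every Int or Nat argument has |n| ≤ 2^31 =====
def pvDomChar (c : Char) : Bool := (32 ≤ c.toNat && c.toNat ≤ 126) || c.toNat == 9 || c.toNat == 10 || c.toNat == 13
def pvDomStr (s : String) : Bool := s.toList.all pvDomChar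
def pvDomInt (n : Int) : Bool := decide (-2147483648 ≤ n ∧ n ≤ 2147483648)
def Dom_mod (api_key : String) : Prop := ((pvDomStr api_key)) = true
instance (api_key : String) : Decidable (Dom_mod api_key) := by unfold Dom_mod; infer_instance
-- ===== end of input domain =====

-- B replaces A's counter-threaded scan over every character by a direct loop over the
-- five replacement values, writing each at position 2*j into a char list (objective: simpler).

-- ===== PORT A =====
def pvArr : List Char := ['0', '2', '2', '9', '3']

-- A's loop body: state = (newkey, counter); the pyGetD defaults are never reached
-- (the counter branch is guarded, and i ranges over valid indices of cs)
def pvStepA (cs : List Char) (st : List Char × Int) (i : Int) : List Char × Int :=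
  if i % 2 == 0 then
    if st.2 < (pvArr.length : Int) then
      (st.1 ++ [PySem.List.pyGetD pvArr st.2 ' '], st.2 + 1)
    else
      (st.1 ++ [PySem.List.pyGetD cs i ' '], st.2)
  else
    (st.1 ++ [PySem.List.pyGetD cs i ' '], st.2)

def mod (api_key : String) : String :=
  let cs := api_key.toList
  let r := (PySem.List.pyRange 0 (cs.length : Int) 1).foldl (pvStepA cs) ([], 0)
  String.ofList r.1

-- ===== PORT B =====
def pvStepB (ch : List Char) (j : Nat) : List Char :=
  if 2 * j < ch.length then ch.set (2 * j) (pvArr.getD j ' ') else ch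

def mod_alt (api_key : String) : String :=
  let chars := api_key.toList
  String.ofList ((List.range 5).foldl pvStepB chars)

-- ===== PRECONDITION & SPEC =====
def Spec_mod (api_key : String) (out : String) : Prop := out = mod_alt api_key
instance (api_key : String) (out : String) : Decidable (Spec_mod api_key out) := by unfold Spec_mod; infer_instance

-- ===== CLAIM (what is proved, stated in full; the proofs are below) =====
def Claim_equal_mod : Prop := ∀ (api_key : String), Dom_mod api_key → Spec_mod api_key (mod api_key)

-- ===== LEMMAS AND PROOFS =====

-- characterisation of A's fold: after the first m indices the built list is the
-- m-prefix of the target and the counter is the number of even indices seen, capped at 5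
theorem pvA_invariant (cs : List Char) (m : Nat) :
    (PySem.List.pyRange 0 (m : Int) 1).foldl (pvStepA cs) ([], 0) =
      ((List.range m).map
          (fun i => if i % 2 = 0 ∧ i < 10 then pvArr.getD (i / 2) ' ' else cs.getD i ' '),
        ((min ((m + 1) / 2) 5 : Nat) : Int)) := by
  induction m with
  | zero => simp [PySem.List.pyRange_one_eq_nil]
  | succ m ih =>
    have hsplit : PySem.List.pyRange 0 ((m + 1 : Nat) : Int) 1 =
        PySem.List.pyRange 0 (m : Int) 1 ++ [(m : Int)] := by
      have := PySem.List.pyRange_one_succ_right (a := 0) (b := (m : Int)) (by positivity)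
      push_cast
      simpa using this
    rw [hsplit, List.foldl_append, ih, List.range_succ, List.map_append]
    simp only [List.foldl_cons, List.foldl_nil, List.map_cons, List.map_nil]
    unfold pvStepA
    by_cases he : m % 2 = 0
    · have hmod : ((m : Int) % 2 == 0) = true := by
        simp only [beq_iff_eq]; omega
      by_cases hlt : m < 10
      · have hc : (((min ((m + 1) / 2) 5 : Nat) : Int) < (pvArr.length : Int)) := by
          simp only [pvArr, List.length]; omega
        simp only [hmod, hc, if_pos, Prod.mk.injEq]
        refine ⟨?_, by omega⟩
        have harr : PySem.List.pyGetD pvArr ((min ((m + 1) / 2) 5 : Nat) : Int) ' '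
            = pvArr.getD (m / 2) ' ' := by
          rw [PySem.List.pyGetD_natCast]
          congr 1
          omega
        rw [harr]
        have : (if m % 2 = 0 ∧ m < 10 then pvArr.getD (m / 2) ' ' else cs.getD m ' ')
            = pvArr.getD (m / 2) ' ' := by simp [he, hlt]
        rw [this]
      · have hc : ¬ (((min ((m + 1) / 2) 5 : Nat) : Int) < (pvArr.length : Int)) := by
          simp only [pvArr, List.length]; omega
        simp only [hmod, hc, if_neg, not_false_iff, if_true, Prod.mk.injEq]
        refine ⟨?_, by omega⟩
        rw [PySem.List.pyGetD_natCast]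
        have : (if m % 2 = 0 ∧ m < 10 then pvArr.getD (m / 2) ' ' else cs.getD m ' ')
            = cs.getD m ' ' := by
          have : ¬ (m % 2 = 0 ∧ m < 10) := by omega
          simp [this]
        rw [this]
    · have hmod : ((m : Int) % 2 == 0) = false := by
        simp only [beq_eq_false_iff_ne, ne_eq]; omega
      simp only [hmod, Bool.false_eq_true, if_false, Prod.mk.injEq]
      refine ⟨?_, by omega⟩
      rw [PySem.List.pyGetD_natCast]
      have : (if m % 2 = 0 ∧ m < 10 then pvArr.getD (m / 2) ' ' else cs.getD m ' ')
          = cs.getD m ' ' := by simp [he]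
      rw [this]

theorem pvStepB_length (ch : List Char) (j : Nat) : (pvStepB ch j).length = ch.length := by
  unfold pvStepB
  split <;> simp

theorem pvStepB_eq_set (ch : List Char) (j : Nat) (h : 2 * j < ch.length) :
    pvStepB ch j = ch.set (2 * j) (pvArr.getD j ' ') := by
  unfold pvStepB
  rw [if_pos h]

theorem pvStepB_eq_self (ch : List Char) (j : Nat) (h : ¬ 2 * j < ch.length) :
    pvStepB ch j = ch := by
  unfold pvStepB
  rw [if_neg h]

theorem pvB_length (t : Nat) (cs : List Char) :
    ((List.range t).foldl pvStepB cs).length = cs.length := by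
  induction t with
  | zero => simp
  | succ t ih =>
    rw [List.range_succ, List.foldl_append]
    simp only [List.foldl_cons, List.foldl_nil]
    rw [pvStepB_length, ih]

-- characterisation of B's fold, position by position
theorem pvB_getElem? (t : Nat) (cs : List Char) (i : Nat) (hi : i < cs.length) :
    ((List.range t).foldl pvStepB cs)[i]? =
      some (if i % 2 = 0 ∧ i < 2 * t then pvArr.getD (i / 2) ' ' else cs[i]) := by
  induction t with
  | zero => simp [List.getElem?_eq_getElem hi]
  | succ t ih =>
    rw [List.range_succ, List.foldl_append]
    simp only [List.foldl_cons, List.foldl_nil]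
    have hF : ((List.range t).foldl pvStepB cs).length = cs.length := pvB_length t cs
    by_cases hlen : 2 * t < ((List.range t).foldl pvStepB cs).length
    · rw [pvStepB_eq_set _ _ hlen, List.getElem?_set]
      by_cases heq : 2 * t = i
      · rw [if_pos heq, if_pos hlen]
        have h1 : i % 2 = 0 ∧ i < 2 * (t + 1) := by omega
        rw [if_pos h1]
        congr 2
        omega
      · rw [if_neg heq, ih]
        have h2 : (i % 2 = 0 ∧ i < 2 * t) ↔ (i % 2 = 0 ∧ i < 2 * (t + 1)) := by omega
        simp only [h2]
    · rw [pvStepB_eq_self _ _ hlen, ih]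
      rw [hF] at hlen
      have h2 : (i % 2 = 0 ∧ i < 2 * t) ↔ (i % 2 = 0 ∧ i < 2 * (t + 1)) := by omega
      simp only [h2]

-- ===== VERDICT (by name: the statement is the Claim_ definition above) =====
theorem mod_spec : Claim_equal_mod := by
  intro api_key _
  unfold Spec_mod mod mod_alt
  simp only
  apply congrArg String.ofList
  rw [pvA_invariant]
  apply List.ext_getElem?
  intro i
  by_cases hi : i < api_key.toList.length
  · rw [pvB_getElem? 5 api_key.toList i hi, List.getElem?_map,
      List.getElem?_range hi]
    simp only [Option.map_some]
    have h10 : (2 : Nat) * 5 = 10 := by norm_num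
    rw [h10]
    congr 1
    split
    · rfl
    · exact (List.getD_eq_getElem api_key.toList ' ' hi).symm ▸ rfl
  · rw [List.getElem?_eq_none
        (by simp only [List.length_map, List.length_range]; omega),
      List.getElem?_eq_none (by rw [pvB_length]; omega)]
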